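-- pv_equiv track=rewrite | github.com/borisshapa/TunePPO | ppotune/utils.py | liststrip
-- ===== SOURCE A (Python) =====
-- import typing as tp
--
-- def liststrip(lst: list, element: tp.Any) -> list:
--     start = 0
--     while start < len(lst) and lst[start] == element:
--         start += 1
--
--     end = len(lst)
--     while end > start and lst[end - 1] == element:
--         end -= 1
--
--     return lst[start:end]
-- ===== SOURCE B (Python) =====
-- def liststrip(lst: list, element) -> list:
--     # One pass: collect the indices of elements that differ from `element`,
--     # then return the single slice spanning the first and last such index.
--     idx = [i for i, x in enumerate(lst) if not (x == element)]
--     if not idx: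
--         return lst[:0]
--     return lst[idx[0]:idx[-1] + 1]
-- ===== Notes on version B (the rewrite author's own statement) =====
-- stated objective: alternative
-- what changed: Replaces the two early-stopping boundary while-loops with a single enumerate pass collecting indices of non-matching elements, then one slice from the first to the last such index.
import Mathlib
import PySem

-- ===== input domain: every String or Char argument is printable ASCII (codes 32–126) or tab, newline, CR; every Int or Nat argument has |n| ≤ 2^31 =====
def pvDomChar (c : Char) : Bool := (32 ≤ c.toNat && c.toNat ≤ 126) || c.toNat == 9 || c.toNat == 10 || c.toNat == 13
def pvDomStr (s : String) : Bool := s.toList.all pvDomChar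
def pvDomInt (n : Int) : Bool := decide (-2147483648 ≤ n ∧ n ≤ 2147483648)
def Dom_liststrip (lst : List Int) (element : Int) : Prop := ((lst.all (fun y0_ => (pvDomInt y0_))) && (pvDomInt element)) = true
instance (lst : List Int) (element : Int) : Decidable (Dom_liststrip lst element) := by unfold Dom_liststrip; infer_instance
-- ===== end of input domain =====

-- B replaces A's two early-stopping boundary while-loops by one enumerate pass collecting
-- the indices of non-matching elements plus a single slice (alternative decomposition, same O(n) cost).

-- ===== PORT A =====
-- first while loop: advance start while lst[start] == element
def liststripStart (lst : List Int) (element : Int) (start : Nat) : Nat :=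
  if h : start < lst.length ∧ PySem.List.pyGetD lst (start : Int) 0 = element then
    liststripStart lst element (start + 1)
  else start
termination_by lst.length - start
decreasing_by omega

-- second while loop: retreat end while end > start and lst[end-1] == element
def liststripEnd (lst : List Int) (element : Int) (start : Nat) (en : Nat) : Nat :=
  if h : start < en ∧ PySem.List.pyGetD lst ((en : Int) - 1) 0 = element then
    liststripEnd lst element start (en - 1)
  else en
termination_by en
decreasing_by omega

def liststrip (lst : List Int) (element : Int) : List Int :=
  let start := liststripStart lst element 0
  let en := liststripEnd lst element start lst.length
  PySem.List.slice lst (some (start : Int)) (some (en : Int))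

-- ===== PORT B =====
def liststrip_alt (lst : List Int) (element : Int) : List Int :=
  let idx : List Int :=
    ((PySem.List.enumerate lst 0).filter (fun q => !(q.2 == element))).map (·.1)
  if idx = [] then
    PySem.List.slice lst none (some 0)
  else
    PySem.List.slice lst (some (PySem.List.pyGetD idx 0 0))
      (some (PySem.List.pyGetD idx (-1) 0 + 1))

-- ===== PRECONDITION & SPEC =====
def Spec_liststrip (lst : List Int) (element : Int) (out : List Int) : Prop := out = liststrip_alt lst element
instance (lst : List Int) (element : Int) (out : List Int) : Decidable (Spec_liststrip lst element out) := by unfold Spec_liststrip; infer_instance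

-- ===== CLAIM (what is proved, stated in full; the proofs are below) =====
def Claim_equal_liststrip : Prop := ∀ (lst : List Int) (element : Int), Dom_liststrip lst element → Spec_liststrip lst element (liststrip lst element)

-- ===== LEMMAS AND PROOFS =====

-- A's first loop computes start = length of the leading run of `element`
theorem liststripStart_spec (lst : List Int) (element : Int) :
    ∀ start, start ≤ lst.length →
      liststripStart lst element start
        = start + ((lst.drop start).takeWhile (fun x => x == element)).length := by
  intro start hle
  induction hn : lst.length - start generalizing start with
  | zero =>
    have hs : start = lst.length := by omega
    rw [liststripStart]
    simp [hs]
  | succ k ih =>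
    have hlt : start < lst.length := by omega
    rw [liststripStart]
    rw [List.drop_eq_getElem_cons hlt]
    by_cases hx : lst[start] = element
    · have hget : PySem.List.pyGetD lst (start : Int) 0 = element := by
        rw [PySem.List.pyGetD_natCast]
        simp [List.getD, hlt, hx]
      rw [dif_pos ⟨hlt, hget⟩, ih (start + 1) (by omega) (by omega)]
      simp [hx]
      omega
    · have hget : ¬ (start < lst.length ∧ PySem.List.pyGetD lst (start : Int) 0 = element) := by
        rw [PySem.List.pyGetD_natCast]
        simp [List.getD, hlt, hx]
      rw [dif_neg hget]
      simp [hx]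

-- splitting off the last element of the window [start, en)
theorem window_split (lst : List Int) (start en : Nat) (h1 : start < en) (h2 : en ≤ lst.length) :
    (lst.drop start).take (en - start)
      = (lst.drop start).take (en - 1 - start) ++ [lst[en - 1]'(by omega)] := by
  have hes : en - start = (en - 1 - start) + 1 := by omega
  rw [hes, List.take_add_one]
  have hidx : (lst.drop start)[en - 1 - start]? = some (lst[en - 1]'(by omega)) := by
    rw [List.getElem?_drop]
    have : start + (en - 1 - start) = en - 1 := by omega
    rw [this, List.getElem?_eq_getElem (by omega)]
  rw [hidx]
  rfl

-- A's second loop strips the trailing run of `element` from the window [start, en)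
theorem liststripEnd_spec (lst : List Int) (element : Int) :
    ∀ en start, start ≤ en → en ≤ lst.length →
      liststripEnd lst element start en
        = start + ((((lst.drop start).take (en - start)).reverse.dropWhile (fun x => x == element)).length) := by
  intro en start hse hel
  induction hn : en - start generalizing en with
  | zero =>
    have : en = start := by omega
    subst this
    rw [liststripEnd, dif_neg (by omega)]
    simp
  | succ k ih =>
    have h1 : start < en := by omega
    have hcast : ((en : Int) - 1) = ((en - 1 : Nat) : Int) := by omega
    rw [liststripEnd, ← hn, window_split lst start en h1 hel,
        show en - 1 - start = k from by omega]
    by_cases hx : lst[en - 1]'(by omega) = element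
    · have hget : PySem.List.pyGetD lst ((en : Int) - 1) 0 = element := by
        rw [hcast, PySem.List.pyGetD_natCast]
        simp [List.getD, List.getElem?_eq_getElem (show en - 1 < lst.length by omega), hx]
      rw [dif_pos ⟨h1, hget⟩, ih (en - 1) (by omega) (by omega) (by omega)]
      simp [hx]
    · have hget : ¬ (start < en ∧ PySem.List.pyGetD lst ((en : Int) - 1) 0 = element) := by
        rw [hcast, PySem.List.pyGetD_natCast]
        simp [List.getD, List.getElem?_eq_getElem (show en - 1 < lst.length by omega), hx]
      rw [dif_neg hget]
      simp [hx]
      omega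

-- structural form of B's index list
def nidx (element : Int) : List Int → Int → List Int
  | [], _ => []
  | x :: xs, n => if x == element then nidx element xs (n + 1) else n :: nidx element xs (n + 1)

theorem nidx_eq (element : Int) (lst : List Int) (n : Int) :
    ((PySem.List.enumerate lst n).filter (fun q => !(q.2 == element))).map (·.1)
      = nidx element lst n := by
  induction lst generalizing n with
  | nil => simp [nidx, PySem.List.enumerate]
  | cons x xs ih =>
    simp only [PySem.List.enumerate_cons, List.filter_cons, nidx]
    by_cases h : x = element <;> simp [h, ih]

theorem nidx_nil_iff (element : Int) (lst : List Int) (n : Int) :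
    nidx element lst n = [] ↔ lst.all (fun x => x == element) := by
  induction lst generalizing n with
  | nil => simp [nidx]
  | cons x xs ih =>
    by_cases h : x = element <;> simp [nidx, h, ih]

theorem nidx_head (element : Int) (lst : List Int) (n : Int)
    (h : ¬ lst.all (fun x => x == element) = true) :
    (nidx element lst n).headD 0 = n + ((lst.takeWhile (fun x => x == element)).length : Int) := by
  induction lst generalizing n with
  | nil => simp at h
  | cons x xs ih =>
    by_cases hx : x = element
    · have h' : ¬ xs.all (fun x => x == element) = true := by simp [hx] at h; simpa using h
      simp only [nidx, hx]
      simp only [beq_self_eq_true, if_true]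
      rw [ih (n + 1) h']
      simp
      ring
    · simp [nidx, hx]

theorem nidx_append (element : Int) (xs : List Int) (y : Int) (n : Int) :
    nidx element (xs ++ [y]) n
      = nidx element xs n ++ (if y == element then [] else [n + (xs.length : Int)]) := by
  induction xs generalizing n with
  | nil => by_cases h : y = element <;> simp [nidx, h]
  | cons x xs ih =>
    by_cases h : x = element <;> simp [nidx, h, ih] <;> split <;> simp <;> ring

theorem nidx_last (element : Int) (lst : List Int) (n : Int)
    (h : ¬ lst.all (fun x => x == element) = true) :
    (nidx element lst n).getLast? =
      some (n + (lst.length : Int) - 1 - ((lst.reverse.takeWhile (fun x => x == element)).length : Int)) := by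
  induction lst using List.reverseRecOn with
  | nil => simp at h
  | append_singleton xs y ih =>
    rw [nidx_append]
    by_cases hy : y = element
    · have h' : ¬ xs.all (fun x => x == element) = true := by
        simp [hy] at h; simpa using h
      rw [if_pos (by simp [hy]), List.append_nil, ih h']
      simp [hy]
      ring
    · rw [if_neg (by simp [hy]), List.getLast?_concat]
      simp [hy]
      ring

-- dropping the leading run of p is the same as dropWhile p
theorem drop_takeWhile_length (p : Int → Bool) (l : List Int) :
    l.drop (l.takeWhile p).length = l.dropWhile p := by
  induction l with
  | nil => simp
  | cons x xs ih => by_cases h : p x <;> simp [h, ih]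

-- the trailing run of p in l equals the trailing run of p after the leading run is removed
theorem takeWhile_reverse_strip (p : Int → Bool) (l : List Int) (h : l.dropWhile p ≠ []) :
    l.reverse.takeWhile p = (l.dropWhile p).reverse.takeWhile p := by
  conv_lhs => rw [← List.takeWhile_append_dropWhile (p := p) (l := l)]
  rw [List.reverse_append, List.takeWhile_append, if_neg]
  intro hfull
  have heq : (l.dropWhile p).reverse.takeWhile p = (l.dropWhile p).reverse :=
    (List.takeWhile_prefix p).eq_of_length hfull
  have hall : ∀ x ∈ (l.dropWhile p).reverse, p x = true := List.takeWhile_eq_self_iff.mp heq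
  have hhead : p ((l.dropWhile p).head h) = false := List.head_dropWhile_not p h
  have : p ((l.dropWhile p).head h) = true := by
    apply hall
    simp [List.head_mem]
  simp [this] at hhead

theorem liststrip_spec_aux (lst : List Int) (element : Int) :
    liststrip lst element = liststrip_alt lst element := by
  have hsplit : lst.takeWhile (fun x => x == element) ++ lst.dropWhile (fun x => x == element) = lst :=
    List.takeWhile_append_dropWhile
  have hlen : lst.length
      = (lst.takeWhile (fun x => x == element)).length + (lst.dropWhile (fun x => x == element)).length := by
    conv_lhs => rw [← hsplit]
    rw [List.length_append]
  have hdrop : lst.drop (lst.takeWhile (fun x => x == element)).length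
      = lst.dropWhile (fun x => x == element) := drop_takeWhile_length _ lst
  have hksplit : ((lst.dropWhile (fun x => x == element)).reverse.takeWhile (fun x => x == element)).length
      + ((lst.dropWhile (fun x => x == element)).reverse.dropWhile (fun x => x == element)).length
      = (lst.dropWhile (fun x => x == element)).length := by
    have h0 := congrArg List.length
      (List.takeWhile_append_dropWhile (p := fun x => x == element)
        (l := (lst.dropWhile (fun x => x == element)).reverse))
    simp only [List.length_append, List.length_reverse] at h0
    omega
  -- A's value
  have hstart : liststripStart lst element 0 = (lst.takeWhile (fun x => x == element)).length := by
    rw [liststripStart_spec lst element 0 (by omega)]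
    simp
  have hend : liststripEnd lst element (lst.takeWhile (fun x => x == element)).length lst.length
      = (lst.takeWhile (fun x => x == element)).length
        + ((lst.dropWhile (fun x => x == element)).reverse.dropWhile (fun x => x == element)).length := by
    rw [liststripEnd_spec lst element lst.length (lst.takeWhile (fun x => x == element)).length
        (by omega) (by omega), hdrop]
    congr 2
    rw [show lst.length - (lst.takeWhile (fun x => x == element)).length
          = (lst.dropWhile (fun x => x == element)).length from by omega, List.take_length]
  have hA : liststrip lst element
      = (lst.dropWhile (fun x => x == element)).take
          ((lst.dropWhile (fun x => x == element)).reverse.dropWhile (fun x => x == element)).length := by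
    simp only [liststrip]
    rw [hstart, hend, PySem.List.slice_natCast, hdrop]
    congr 1
    omega
  rw [hA]
  -- B's value
  simp only [liststrip_alt, nidx_eq]
  by_cases hall : lst.all (fun x => x == element) = true
  · have hnil : nidx element lst 0 = [] := (nidx_nil_iff element lst 0).mpr hall
    have htnil : lst.dropWhile (fun x => x == element) = [] := by
      rw [List.dropWhile_eq_nil_iff]
      simpa using hall
    rw [if_pos hnil, htnil]
    rw [show (0 : Int) = ((0 : Nat) : Int) from rfl, PySem.List.slice_to_natCast]
    simp
  · have hne : nidx element lst 0 ≠ [] := by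
      rw [ne_eq, nidx_nil_iff]; exact hall
    have htne : lst.dropWhile (fun x => x == element) ≠ [] := by
      rw [ne_eq, List.dropWhile_eq_nil_iff]
      intro hc
      exact hall (by simpa using hc)
    rw [if_neg hne]
    have hhead : PySem.List.pyGetD (nidx element lst 0) 0 0
        = (((lst.takeWhile (fun x => x == element)).length : Nat) : Int) := by
      rw [PySem.List.pyGetD_zero]
      have hgd : (nidx element lst 0).getD 0 0 = (nidx element lst 0).headD 0 := by
        cases nidx element lst 0 <;> rfl
      rw [hgd, nidx_head element lst 0 hall]
      ring
    have hkk : lst.reverse.takeWhile (fun x => x == element)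
        = (lst.dropWhile (fun x => x == element)).reverse.takeWhile (fun x => x == element) :=
      takeWhile_reverse_strip _ lst htne
    have hklen : ((lst.dropWhile (fun x => x == element)).reverse.takeWhile (fun x => x == element)).length
        ≤ (lst.dropWhile (fun x => x == element)).length := by omega
    have hlast : PySem.List.pyGetD (nidx element lst 0) (-1) 0 + 1
        = ((lst.length
            - ((lst.dropWhile (fun x => x == element)).reverse.takeWhile (fun x => x == element)).length : Nat) : Int) := by
      rw [PySem.List.pyGetD_neg_one (nidx element lst 0) 0 hne]
      have hgl := nidx_last element lst 0 hall
      rw [List.getLast?_eq_some_getLast hne] at hgl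
      rw [Option.some.injEq] at hgl
      rw [hgl, hkk]
      omega
    rw [hhead, hlast, PySem.List.slice_natCast, hdrop]
    congr 1
    omega

-- ===== VERDICT (by name: the statement is the Claim_ definition above) =====
theorem liststrip_spec : Claim_equal_liststrip := by
  intro lst element _
  unfold Spec_liststrip
  exact liststrip_spec_aux lst element
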